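-- pv_equiv track=rewrite | github.com/Gimilov/DPV-algorithms-practice-tool | student_solutions/dpv_6_9.py | solution
-- ===== SOURCE A (Python) =====
-- def solution(args: tuple) -> int:
--     # n: length of string
--     # cuts: sorted list of cut positions (0 < cut < n)
--     n, cuts = args
--     # Returns minimum cost
--
--     # add boundaries at 0 and n
--     cuts = [0] + cuts + [n]
--     m = len(cuts)
--
--     # DP table
--     T = [[0] * m for _ in range(m)]
--
--     # fill by increasing segment length
--     for length in range(2, m):  # at least 2 apart (i, j)
--         for i in range(m - length):
--             j = i + length
--             T[i][j] = min(
--                 (cuts[j] - cuts[i]) + T[i][k] + T[k][j]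
--                 for k in range(i + 1, j)
--             )
--
--     return T[0][m - 1]
-- ===== SOURCE B (Python) =====
-- def solution(args: tuple) -> int:
--     n, cuts = args
--     pts = [0] + list(cuts) + [n]
--     memo = {}
--     def opt(i, j):
--         if j - i < 2:
--             return 0
--         v = memo.get((i, j))
--         if v is not None:
--             return v
--         w = pts[j] - pts[i]
--         best = None
--         for k in range(i + 1, j):
--             c1 = memo.get((i, k))
--             if c1 is None:
--                 c1 = opt(i, k)
--             c2 = memo.get((k, j))
--             if c2 is None:
--                 c2 = opt(k, j)
--             c = w + c1 + c2
--             if best is None or c < best: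
--                 best = c
--         memo[(i, j)] = best
--         return best
--     return opt(0, len(pts) - 1)
-- ===== Notes on version B (the rewrite author's own statement) =====
-- stated objective: alternative
-- what changed: Replaces A's bottom-up m x m interval-DP table filled by increasing segment length with top-down memoised recursion on intervals (i,j) that computes the same recurrence on demand via a dict keyed by (i,j).
import Mathlib
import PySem

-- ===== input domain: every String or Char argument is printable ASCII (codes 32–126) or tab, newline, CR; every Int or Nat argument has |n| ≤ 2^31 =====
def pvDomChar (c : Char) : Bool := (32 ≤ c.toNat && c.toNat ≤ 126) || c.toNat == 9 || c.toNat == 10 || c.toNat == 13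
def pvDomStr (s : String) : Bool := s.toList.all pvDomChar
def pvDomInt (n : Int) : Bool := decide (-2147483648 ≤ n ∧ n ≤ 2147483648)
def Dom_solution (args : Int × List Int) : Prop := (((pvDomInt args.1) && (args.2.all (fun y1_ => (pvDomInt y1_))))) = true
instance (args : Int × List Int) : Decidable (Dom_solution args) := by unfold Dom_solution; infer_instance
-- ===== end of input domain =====

-- B replaces A's bottom-up interval-DP table with top-down memoised recursion on the
-- same recurrence (objective: alternative decomposition, same asymptotic cost).

-- ===== PORT A =====
-- min(<generator>) over a nonempty list of ints (Python's min with no key)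
def minL (l : List Int) : Int := (PySem.List.min? l (fun y => y)).getD 0

def solution (args : Int × List Int) : Int :=
  let n := args.1
  let cuts := [(0 : Int)] ++ args.2 ++ [n]
  let m : Int := (cuts.length : Int)
  -- T = [[0] * m for _ in range(m)]
  let T0 : List (List Int) := (PySem.List.pyRange 0 m 1).map (fun _ => List.replicate cuts.length (0 : Int))
  let T := (PySem.List.pyRange 2 m 1).foldl (fun T length =>
    (PySem.List.pyRange 0 (m - length) 1).foldl (fun T i =>
      let j := i + length
      let v := minL ((PySem.List.pyRange (i + 1) j 1).map (fun k =>
        (PySem.List.pyGetD cuts j 0 - PySem.List.pyGetD cuts i 0)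
        + PySem.List.pyGetD (PySem.List.pyGetD T i []) k 0
        + PySem.List.pyGetD (PySem.List.pyGetD T k []) j 0))
      -- T[i][j] = v
      PySem.List.pySetD T i (PySem.List.pySetD (PySem.List.pyGetD T i []) j v)) T) T0
  PySem.List.pyGetD (PySem.List.pyGetD T 0 []) (m - 1) 0

-- ===== PORT B =====
-- memoised recursion opt(i, j); fuel d ≥ j - i makes the recursion structural (never exhausted on the calls made)
def optB (pts : List Int) : Nat → Int → Int → PySem.Dict (Int × Int) Int → Int × PySem.Dict (Int × Int) Int
  | d, i, j, memo =>
    if j - i < 2 then (0, memo)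
    else
      match memo.get? (i, j) with
      | some v => (v, memo)
      | none =>
        match d with
        | 0 => (0, memo)  -- fuel guard only; unreachable when d ≥ j - i
        | d + 1 =>
          let w := PySem.List.pyGetD pts j 0 - PySem.List.pyGetD pts i 0
          let r := (PySem.List.pyRange (i + 1) j 1).foldl
            (fun (s : Option Int × PySem.Dict (Int × Int) Int) k =>
              -- c1 = memo.get((i, k)); if c1 is None: c1 = opt(i, k)
              let r1 := match s.2.get? (i, k) with
                        | some v => (v, s.2)
                        | none => optB pts d i k s.2
              -- c2 = memo.get((k, j)); if c2 is None: c2 = opt(k, j)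
              let r2 := match r1.2.get? (k, j) with
                        | some v => (v, r1.2)
                        | none => optB pts d k j r1.2
              let c := w + r1.1 + r2.1
              match s.1 with
              | none => (some c, r2.2)
              | some b => (some (if c < b then c else b), r2.2)) (none, memo)
          let best := r.1.getD 0   -- best is not None here: the range is nonempty
          (best, r.2.insert (i, j) best)

def solution_alt (args : Int × List Int) : Int :=
  let n := args.1
  let pts := [(0 : Int)] ++ args.2 ++ [n]
  (optB pts (pts.length - 1) 0 ((pts.length : Int) - 1) PySem.Dict.empty).1

-- ===== PRECONDITION & SPEC =====
def Spec_solution (args : Int × List Int) (out : Int) : Prop := out = solution_alt args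
instance (args : Int × List Int) (out : Int) : Decidable (Spec_solution args out) := by unfold Spec_solution; infer_instance

-- ===== CLAIM (what is proved, stated in full; the proofs are below) =====
def Claim_equal_solution : Prop := ∀ (args : Int × List Int), Dom_solution args → Spec_solution args (solution args)

-- ===== LEMMAS AND PROOFS =====

-- reference value OPT pts i j of the shared recurrence, via fuel
def OPTf (pts : List Int) : Nat → Int → Int → Int
  | 0, _, _ => 0
  | d + 1, i, j =>
    if j - i < 2 then 0
    else minL ((PySem.List.pyRange (i + 1) j 1).map (fun k =>
      (PySem.List.pyGetD pts j 0 - PySem.List.pyGetD pts i 0) + OPTf pts d i k + OPTf pts d k j))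

def OPT (pts : List Int) (i j : Int) : Int := OPTf pts (j - i).toNat i j

lemma OPTf_low (pts : List Int) (d : Nat) (i j : Int) (h : j - i < 2) : OPTf pts d i j = 0 := by
  cases d <;> simp [OPTf, h]

lemma OPT_low (pts : List Int) (i j : Int) (h : j - i < 2) : OPT pts i j = 0 :=
  OPTf_low pts _ i j h

lemma OPTf_mono (pts : List Int) : ∀ d (i j : Int), (j - i).toNat ≤ d → OPTf pts d i j = OPT pts i j := by
  intro d
  induction d using Nat.strong_induction_on with
  | _ d IH =>
    intro i j h
    by_cases hl : j - i < 2
    · rw [OPTf_low pts d i j hl, OPT_low pts i j hl]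
    · obtain ⟨e, rfl⟩ : ∃ e, d = e + 1 := ⟨d - 1, by omega⟩
      obtain ⟨s, hs⟩ : ∃ s, (j - i).toNat = s + 1 := ⟨(j - i).toNat - 1, by omega⟩
      unfold OPT
      rw [hs]
      simp only [OPTf]
      rw [if_neg (by omega), if_neg (by omega)]
      congr 1
      apply List.map_congr_left
      intro k hk
      rw [PySem.List.mem_pyRange_one] at hk
      rw [IH e (by omega) i k (by omega), IH e (by omega) k j (by omega),
          IH s (by omega) i k (by omega), IH s (by omega) k j (by omega)]

lemma OPT_unfold (pts : List Int) (i j : Int) (h : 2 ≤ j - i) :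
    OPT pts i j = minL ((PySem.List.pyRange (i + 1) j 1).map (fun k =>
      (PySem.List.pyGetD pts j 0 - PySem.List.pyGetD pts i 0) + OPT pts i k + OPT pts k j)) := by
  obtain ⟨s, hs⟩ : ∃ s, (j - i).toNat = s + 1 := ⟨(j - i).toNat - 1, by omega⟩
  unfold OPT
  rw [hs]
  simp only [OPTf]
  rw [if_neg (by omega)]
  congr 1
  apply List.map_congr_left
  intro k hk
  rw [PySem.List.mem_pyRange_one] at hk
  rw [OPTf_mono pts s i k (by omega), OPTf_mono pts s k j (by omega)]
  rfl

-- generic invariant rule for a fold over range(a, b)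
lemma foldl_pyRange_inv {σ : Type} (f : σ → Int → σ) (P : Int → σ → Prop) :
    ∀ (n : Nat) (a b : Int), (b - a).toNat ≤ n → a ≤ b →
      (∀ x s, a ≤ x → x < b → P x s → P (x + 1) (f s x)) →
      ∀ s, P a s → P b ((PySem.List.pyRange a b 1).foldl f s) := by
  intro n
  induction n with
  | zero =>
    intro a b hn hab _ s hP
    have : a = b := by omega
    subst this
    rw [PySem.List.pyRange_one_eq_nil le_rfl]
    exact hP
  | succ n ih =>
    intro a b hn hab hstep s hP
    by_cases hb : a = b
    · subst hb
      rw [PySem.List.pyRange_one_eq_nil le_rfl]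
      exact hP
    · have hab' : a < b := by omega
      rw [PySem.List.pyRange_one_cons hab', List.foldl_cons]
      exact ih (a + 1) b (by omega) (by omega)
        (fun x s hx hx' => hstep x s (by omega) hx') (f s a)
        (hstep a s le_rfl hab' hP)

-- ---- B side ----
def memoInv (pts : List Int) (M : PySem.Dict (Int × Int) Int) : Prop :=
  ∀ p v, M.get? p = some v → v = OPT pts p.1 p.2

-- the running "best is None or c < best" update of B
def omin (o : Option Int) (c : Int) : Option Int :=
  match o with
  | none => some c
  | some b => some (if c < b then c else b)

lemma foldl_omin : ∀ (l : List Int) (b : Int), l.foldl omin (some b) = some (l.foldl min b) := by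
  intro l
  induction l with
  | nil => intro b; rfl
  | cons c t ih =>
    intro b
    simp only [List.foldl_cons]
    have h : omin (some b) c = some (min b c) := by
      simp only [omin]
      congr 1
      split_ifs with h <;> omega
    rw [h, ih]

lemma minL_cons (x : Int) (xs : List Int) : minL (x :: xs) = xs.foldl min x := by
  rw [minL, PySem.List.min?_id_cons]
  rfl

lemma optB_fold (pts : List Int) (d : Nat) (i j : Int)
    (IH : ∀ (i j : Int) M, memoInv pts M → (j - i).toNat ≤ d →
      (optB pts d i j M).1 = OPT pts i j ∧ memoInv pts (optB pts d i j M).2)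
    (hd : (j - i).toNat ≤ d + 1) (h2 : 2 ≤ j - i)
    (M : PySem.Dict (Int × Int) Int) (hM : memoInv pts M) :
    memoInv pts ((PySem.List.pyRange (i + 1) j 1).foldl
        (fun (s : Option Int × PySem.Dict (Int × Int) Int) k =>
          let r1 := match s.2.get? (i, k) with
                    | some v => (v, s.2)
                    | none => optB pts d i k s.2
          let r2 := match r1.2.get? (k, j) with
                    | some v => (v, r1.2)
                    | none => optB pts d k j r1.2
          let c := PySem.List.pyGetD pts j 0 - PySem.List.pyGetD pts i 0 + r1.1 + r2.1
          match s.1 with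
          | none => (some c, r2.2)
          | some b => (some (if c < b then c else b), r2.2)) (none, M)).2 ∧
      ((PySem.List.pyRange (i + 1) j 1).foldl
        (fun (s : Option Int × PySem.Dict (Int × Int) Int) k =>
          let r1 := match s.2.get? (i, k) with
                    | some v => (v, s.2)
                    | none => optB pts d i k s.2
          let r2 := match r1.2.get? (k, j) with
                    | some v => (v, r1.2)
                    | none => optB pts d k j r1.2
          let c := PySem.List.pyGetD pts j 0 - PySem.List.pyGetD pts i 0 + r1.1 + r2.1
          match s.1 with
          | none => (some c, r2.2)
          | some b => (some (if c < b then c else b), r2.2)) (none, M)).1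
        = ((PySem.List.pyRange (i + 1) j 1).map (fun k =>
            PySem.List.pyGetD pts j 0 - PySem.List.pyGetD pts i 0 + OPT pts i k + OPT pts k j)).foldl omin none := by
  refine foldl_pyRange_inv _
    (fun x s => memoInv pts s.2 ∧ s.1 = ((PySem.List.pyRange (i + 1) x 1).map (fun k =>
      PySem.List.pyGetD pts j 0 - PySem.List.pyGetD pts i 0 + OPT pts i k + OPT pts k j)).foldl omin none)
    ((j - (i + 1)).toNat) (i + 1) j le_rfl (by omega) ?_ (none, M)
    ⟨hM, by rw [PySem.List.pyRange_one_eq_nil le_rfl]; rfl⟩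
  intro x s hx hxj hP
  obtain ⟨o, M'⟩ := s
  obtain ⟨hsM, hso⟩ := hP
  have e1 : (match M'.get? (i, x) with
        | some v => (v, M')
        | none => optB pts d i x M').1 = OPT pts i x ∧ memoInv pts (match M'.get? (i, x) with
        | some v => (v, M')
        | none => optB pts d i x M').2 := by
    cases hg : M'.get? (i, x) with
    | some v => exact ⟨hsM (i, x) v hg, hsM⟩
    | none => exact IH i x M' hsM (by omega)
  have e2 : (match (match M'.get? (i, x) with
        | some v => (v, M')
        | none => optB pts d i x M').2.get? (x, j) with
        | some v => (v, (match M'.get? (i, x) with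
        | some v => (v, M')
        | none => optB pts d i x M').2)
        | none => optB pts d x j (match M'.get? (i, x) with
        | some v => (v, M')
        | none => optB pts d i x M').2).1 = OPT pts x j ∧ memoInv pts (match (match M'.get? (i, x) with
        | some v => (v, M')
        | none => optB pts d i x M').2.get? (x, j) with
        | some v => (v, (match M'.get? (i, x) with
        | some v => (v, M')
        | none => optB pts d i x M').2)
        | none => optB pts d x j (match M'.get? (i, x) with
        | some v => (v, M')
        | none => optB pts d i x M').2).2 := by
    cases hg : (match M'.get? (i, x) with
        | some v => (v, M')
        | none => optB pts d i x M').2.get? (x, j) with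
    | some v => exact ⟨e1.2 (x, j) v hg, e1.2⟩
    | none => exact IH x j _ e1.2 (by omega)
  have hgx : PySem.List.pyGetD pts j 0 - PySem.List.pyGetD pts i 0
        + (match M'.get? (i, x) with
        | some v => (v, M')
        | none => optB pts d i x M').1 + (match (match M'.get? (i, x) with
        | some v => (v, M')
        | none => optB pts d i x M').2.get? (x, j) with
        | some v => (v, (match M'.get? (i, x) with
        | some v => (v, M')
        | none => optB pts d i x M').2)
        | none => optB pts d x j (match M'.get? (i, x) with
        | some v => (v, M')
        | none => optB pts d i x M').2).1
      = PySem.List.pyGetD pts j 0 - PySem.List.pyGetD pts i 0 + OPT pts i x + OPT pts x j := by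
    rw [e1.1, e2.1]
  have hrange : PySem.List.pyRange (i + 1) (x + 1) 1 = PySem.List.pyRange (i + 1) x 1 ++ [x] :=
    PySem.List.pyRange_one_succ_right hx
  cases o with
  | none =>
    refine ⟨e2.2, ?_⟩
    dsimp only at hso ⊢
    rw [hrange, List.map_append, List.foldl_append, ← hso, hgx]
    rfl
  | some b =>
    refine ⟨e2.2, ?_⟩
    dsimp only at hso ⊢
    rw [hrange, List.map_append, List.foldl_append, ← hso, hgx]
    rfl

lemma optB_correct (pts : List Int) :
    ∀ d (i j : Int) M, memoInv pts M → (j - i).toNat ≤ d →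
      (optB pts d i j M).1 = OPT pts i j ∧ memoInv pts (optB pts d i j M).2 := by
  intro d
  induction d with
  | zero =>
    intro i j M hM h
    have hl : j - i < 2 := by omega
    rw [optB, if_pos hl]
    exact ⟨(OPT_low pts i j hl).symm, hM⟩
  | succ d IH =>
    intro i j M hM h
    by_cases hl : j - i < 2
    · rw [optB, if_pos hl]
      exact ⟨(OPT_low pts i j hl).symm, hM⟩
    · have h2 : 2 ≤ j - i := by omega
      rw [optB, if_neg hl]
      cases hget : M.get? (i, j) with
      | some v =>
        exact ⟨hM (i, j) v hget, hM⟩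
      | none =>
        have hfold := optB_fold pts d i j IH h h2 M hM
        have hij : i + 1 < j := by omega
        have hcons := PySem.List.pyRange_one_cons hij
        have hbest : (((PySem.List.pyRange (i + 1) j 1).foldl
            (fun (s : Option Int × PySem.Dict (Int × Int) Int) k =>
              let r1 := match s.2.get? (i, k) with
                        | some v => (v, s.2)
                        | none => optB pts d i k s.2
              let r2 := match r1.2.get? (k, j) with
                        | some v => (v, r1.2)
                        | none => optB pts d k j r1.2
              let c := PySem.List.pyGetD pts j 0 - PySem.List.pyGetD pts i 0 + r1.1 + r2.1
              match s.1 with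
              | none => (some c, r2.2)
              | some b => (some (if c < b then c else b), r2.2)) (none, M)).1).getD 0
            = OPT pts i j := by
          rw [hfold.2, OPT_unfold pts i j h2, hcons, List.map_cons, List.foldl_cons, minL_cons]
          rw [show omin none (PySem.List.pyGetD pts j 0 - PySem.List.pyGetD pts i 0
              + OPT pts i (i + 1) + OPT pts (i + 1) j)
            = some (PySem.List.pyGetD pts j 0 - PySem.List.pyGetD pts i 0
              + OPT pts i (i + 1) + OPT pts (i + 1) j) from rfl]
          rw [foldl_omin]
          rfl
        refine ⟨hbest, ?_⟩
        intro p v hp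
        rw [PySem.Dict.get?_insert] at hp
        by_cases hpij : p = (i, j)
        · rw [if_pos hpij] at hp
          injection hp with hv
          rw [hpij, ← hv]
          exact hbest
        · rw [if_neg hpij] at hp
          exact hfold.1 p v hp

lemma alt_eq (n : Int) (cs : List Int) :
    solution_alt (n, cs) = OPT ([(0 : Int)] ++ cs ++ [n]) 0 ((([(0 : Int)] ++ cs ++ [n]).length : Int) - 1) := by
  have hM : memoInv ([(0 : Int)] ++ cs ++ [n]) PySem.Dict.empty := by
    intro p v hp
    rw [PySem.Dict.get?_empty] at hp
    exact absurd hp (by simp)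
  have hlen : ([(0 : Int)] ++ cs ++ [n]).length = cs.length + 2 := by simp
  have h := (optB_correct ([(0 : Int)] ++ cs ++ [n]) (([(0 : Int)] ++ cs ++ [n]).length - 1) 0
    ((([(0 : Int)] ++ cs ++ [n]).length : Int) - 1) PySem.Dict.empty hM (by rw [hlen]; omega)).1
  exact h

-- ---- A side ----
def EntN (T : List (List Int)) (a b : Nat) : Int := (T.getD a []).getD b 0

def Shape (T : List (List Int)) (m : Nat) : Prop :=
  T.length = m ∧ ∀ a : Nat, a < m → (T.getD a []).length = m

lemma getD_set_eq {α : Type} (l : List α) (i : Nat) (x d : α) (h : i < l.length) :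
    (l.set i x).getD i d = x := by
  simp [List.getD_eq_getElem?_getD, h]

lemma getD_set_ne {α : Type} (l : List α) (i j : Nat) (x d : α) (h : j ≠ i) :
    (l.set i x).getD j d = l.getD j d := by
  simp [List.getD_eq_getElem?_getD, (Ne.symm h : i ≠ j)]

lemma ent_cast (T : List (List Int)) (a b : Nat) :
    PySem.List.pyGetD (PySem.List.pyGetD T (a : Int) []) (b : Int) 0 = EntN T a b := by
  rw [PySem.List.pyGetD_natCast, PySem.List.pyGetD_natCast]
  rfl

lemma shape_set (T : List (List Int)) (m a0 b0 : Nat) (v : Int)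
    (hS : Shape T m) (ha0 : a0 < m) : Shape (T.set a0 ((T.getD a0 []).set b0 v)) m := by
  constructor
  · rw [List.length_set]
    exact hS.1
  · intro a ha
    by_cases h : a = a0
    · subst h
      rw [getD_set_eq _ _ _ _ (by rw [hS.1]; exact ha0), List.length_set]
      exact hS.2 a ha
    · rw [getD_set_ne _ _ _ _ _ h]
      exact hS.2 a ha

lemma EntN_set (T : List (List Int)) (m a0 b0 : Nat) (v : Int)
    (hS : Shape T m) (ha0 : a0 < m) (hb0 : b0 < m) (a b : Nat) :
    EntN (T.set a0 ((T.getD a0 []).set b0 v)) a b = if a = a0 ∧ b = b0 then v else EntN T a b := by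
  unfold EntN
  by_cases ha : a = a0
  · subst ha
    rw [getD_set_eq _ _ _ _ (by rw [hS.1]; exact ha0)]
    by_cases hb : b = b0
    · subst hb
      rw [getD_set_eq _ _ _ _ (by rw [hS.2 a ha0]; exact hb0), if_pos ⟨rfl, rfl⟩]
    · rw [getD_set_ne _ _ _ _ _ hb, if_neg (by tauto)]
  · rw [getD_set_ne _ _ _ _ _ ha, if_neg (by tauto)]

lemma shape_T0 (m : Nat) :
    Shape ((PySem.List.pyRange 0 (m : Int) 1).map (fun _ => List.replicate m (0 : Int))) m := by
  constructor
  · simp [PySem.List.length_pyRange_one]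
  · intro a ha
    have hlt : a < (PySem.List.pyRange 0 (m : Int) 1).length := by
      simp [PySem.List.length_pyRange_one]
      omega
    rw [List.getD_eq_getElem?_getD, List.getElem?_map, List.getElem?_eq_getElem hlt]
    simp

lemma EntN_T0 (m : Nat) (a b : Nat) :
    EntN ((PySem.List.pyRange 0 (m : Int) 1).map (fun _ => List.replicate m (0 : Int))) a b = 0 := by
  unfold EntN
  have hrow : ((PySem.List.pyRange 0 (m : Int) 1).map (fun _ => List.replicate m (0 : Int))).getD a []
      = List.replicate m (0 : Int)
      ∨ ((PySem.List.pyRange 0 (m : Int) 1).map (fun _ => List.replicate m (0 : Int))).getD a [] = [] := by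
    rw [List.getD_eq_getElem?_getD (l := (PySem.List.pyRange 0 (m : Int) 1).map (fun _ => List.replicate m (0 : Int))),
      List.getElem?_map]
    cases h : (PySem.List.pyRange 0 (m : Int) 1)[a]? with
    | none => right; rfl
    | some x => left; rfl
  rcases hrow with h | h <;> rw [h]
  · rw [List.getD_eq_getElem?_getD, List.getElem?_replicate]
    split_ifs <;> rfl
  · rfl

lemma solution_eq (n : Int) (cs : List Int) :
    solution (n, cs) = OPT ([(0 : Int)] ++ cs ++ [n]) 0 ((([(0 : Int)] ++ cs ++ [n]).length : Int) - 1) := by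
  have hm2 : 2 ≤ ([(0 : Int)] ++ cs ++ [n]).length := by simp
  -- inner loop: filling the diagonal j - i = L, left to right
  have innerstep : ∀ (L : Int), 2 ≤ L → L < ((([(0 : Int)] ++ cs ++ [n]).length : Int)) →
      ∀ (x : Int) (T : List (List Int)), 0 ≤ x → x < ((([(0 : Int)] ++ cs ++ [n]).length : Int)) - L →
      (Shape T ([(0 : Int)] ++ cs ++ [n]).length ∧ ∀ a b : Nat, a < ([(0 : Int)] ++ cs ++ [n]).length → b < ([(0 : Int)] ++ cs ++ [n]).length →
        EntN T a b = if ((b : Int) - (a : Int) < L ∨ ((b : Int) - (a : Int) = L ∧ (a : Int) < x))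
          then OPT ([(0 : Int)] ++ cs ++ [n]) (a : Int) (b : Int) else 0) →
      (Shape ((fun T i =>
        PySem.List.pySetD T i (PySem.List.pySetD (PySem.List.pyGetD T i []) (i + L)
          (minL ((PySem.List.pyRange (i + 1) (i + L) 1).map (fun k =>
            (PySem.List.pyGetD ([(0 : Int)] ++ cs ++ [n]) (i + L) 0 - PySem.List.pyGetD ([(0 : Int)] ++ cs ++ [n]) i 0)
            + PySem.List.pyGetD (PySem.List.pyGetD T i []) k 0
            + PySem.List.pyGetD (PySem.List.pyGetD T k []) (i + L) 0))))) T x) ([(0 : Int)] ++ cs ++ [n]).length ∧ ∀ a b : Nat, a < ([(0 : Int)] ++ cs ++ [n]).length → b < ([(0 : Int)] ++ cs ++ [n]).length →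
        EntN ((fun T i =>
        PySem.List.pySetD T i (PySem.List.pySetD (PySem.List.pyGetD T i []) (i + L)
          (minL ((PySem.List.pyRange (i + 1) (i + L) 1).map (fun k =>
            (PySem.List.pyGetD ([(0 : Int)] ++ cs ++ [n]) (i + L) 0 - PySem.List.pyGetD ([(0 : Int)] ++ cs ++ [n]) i 0)
            + PySem.List.pyGetD (PySem.List.pyGetD T i []) k 0
            + PySem.List.pyGetD (PySem.List.pyGetD T k []) (i + L) 0))))) T x) a b
          = if ((b : Int) - (a : Int) < L ∨ ((b : Int) - (a : Int) = L ∧ (a : Int) < x + 1))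
            then OPT ([(0 : Int)] ++ cs ++ [n]) (a : Int) (b : Int) else 0) := by
    intro L hL2 hLm x T hx0 hxm hQ
    obtain ⟨a0, rfl⟩ : ∃ a0 : Nat, x = (a0 : Int) := ⟨x.toNat, by omega⟩
    obtain ⟨b0, hb0⟩ : ∃ b0 : Nat, (a0 : Int) + L = (b0 : Int) := ⟨((a0 : Int) + L).toNat, by omega⟩
    have ha0m : a0 < ([(0 : Int)] ++ cs ++ [n]).length := by omega
    have hb0m : b0 < ([(0 : Int)] ++ cs ++ [n]).length := by omega
    simp only [hb0, PySem.List.pySetD_natCast, PySem.List.pyGetD_natCast]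
    have hV : minL ((PySem.List.pyRange ((a0 : Int) + 1) (b0 : Int) 1).map (fun k =>
          ([(0 : Int)] ++ cs ++ [n]).getD b0 0 - ([(0 : Int)] ++ cs ++ [n]).getD a0 0
          + PySem.List.pyGetD (T.getD a0 []) k 0
          + (PySem.List.pyGetD T k []).getD b0 0))
        = OPT ([(0 : Int)] ++ cs ++ [n]) (a0 : Int) (b0 : Int) := by
      rw [OPT_unfold ([(0 : Int)] ++ cs ++ [n]) (a0 : Int) (b0 : Int) (by omega)]
      congr 1
      apply List.map_congr_left
      intro k hk
      rw [PySem.List.mem_pyRange_one] at hk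
      obtain ⟨ak, rfl⟩ : ∃ ak : Nat, k = (ak : Int) := ⟨k.toNat, by omega⟩
      simp only [PySem.List.pyGetD_natCast]
      rw [show (T.getD a0 []).getD ak 0 = EntN T a0 ak from rfl,
        show (T.getD ak []).getD b0 0 = EntN T ak b0 from rfl,
        hQ.2 a0 ak ha0m (by omega), hQ.2 ak b0 (by omega) hb0m,
        if_pos (by omega : ((ak : Int) - (a0 : Int) < L ∨ ((ak : Int) - (a0 : Int) = L ∧ (a0 : Int) < (a0 : Int)))),
        if_pos (by omega : ((b0 : Int) - (ak : Int) < L ∨ ((b0 : Int) - (ak : Int) = L ∧ (ak : Int) < (a0 : Int))))]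
    rw [hV]
    refine ⟨shape_set T ([(0 : Int)] ++ cs ++ [n]).length a0 b0 _ hQ.1 ha0m, fun a b ha hb => ?_⟩
    refine (EntN_set T ([(0 : Int)] ++ cs ++ [n]).length a0 b0 _ hQ.1 ha0m hb0m a b).trans ?_
    by_cases hab : a = a0 ∧ b = b0
    · obtain ⟨rfl, rfl⟩ := hab
      rw [if_pos ⟨rfl, rfl⟩, if_pos (by omega)]
    · rw [if_neg hab, hQ.2 a b ha hb]
      exact if_congr (by omega) rfl rfl
  -- outer loop over segment lengths
  have outer := foldl_pyRange_inv
    (fun T length =>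
      (PySem.List.pyRange 0 (((([(0 : Int)] ++ cs ++ [n]).length : Int)) - length) 1).foldl
        (fun T i =>
        PySem.List.pySetD T i (PySem.List.pySetD (PySem.List.pyGetD T i []) (i + length)
          (minL ((PySem.List.pyRange (i + 1) (i + length) 1).map (fun k =>
            (PySem.List.pyGetD ([(0 : Int)] ++ cs ++ [n]) (i + length) 0 - PySem.List.pyGetD ([(0 : Int)] ++ cs ++ [n]) i 0)
            + PySem.List.pyGetD (PySem.List.pyGetD T i []) k 0
            + PySem.List.pyGetD (PySem.List.pyGetD T k []) (i + length) 0))))) T)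
    (fun L T => Shape T ([(0 : Int)] ++ cs ++ [n]).length ∧ ∀ a b : Nat, a < ([(0 : Int)] ++ cs ++ [n]).length → b < ([(0 : Int)] ++ cs ++ [n]).length →
      EntN T a b = if (b : Int) - (a : Int) < L then OPT ([(0 : Int)] ++ cs ++ [n]) (a : Int) (b : Int) else 0)
    ((((([(0 : Int)] ++ cs ++ [n]).length : Int)) - 2).toNat) 2 ((([(0 : Int)] ++ cs ++ [n]).length : Int)) le_rfl (by omega)
    ?step ((PySem.List.pyRange 0 ((([(0 : Int)] ++ cs ++ [n]).length : Int)) 1).map (fun _ => List.replicate ([(0 : Int)] ++ cs ++ [n]).length (0 : Int)))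
    ⟨shape_T0 ([(0 : Int)] ++ cs ++ [n]).length, fun a b ha hb => by
      rw [EntN_T0 ([(0 : Int)] ++ cs ++ [n]).length a b]
      split_ifs with h
      · exact (OPT_low ([(0 : Int)] ++ cs ++ [n]) (a : Int) (b : Int) (by omega)).symm
      · rfl⟩
  case step =>
    intro L T hL2 hLm hP
    have base0 : Shape T ([(0 : Int)] ++ cs ++ [n]).length ∧ ∀ a b : Nat, a < ([(0 : Int)] ++ cs ++ [n]).length → b < ([(0 : Int)] ++ cs ++ [n]).length →
        EntN T a b = if ((b : Int) - (a : Int) < L ∨ ((b : Int) - (a : Int) = L ∧ (a : Int) < 0))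
          then OPT ([(0 : Int)] ++ cs ++ [n]) (a : Int) (b : Int) else 0 :=
      ⟨hP.1, fun a b ha hb => (hP.2 a b ha hb).trans (if_congr (by omega) rfl rfl)⟩
    have inner := foldl_pyRange_inv
      (fun T i =>
        PySem.List.pySetD T i (PySem.List.pySetD (PySem.List.pyGetD T i []) (i + L)
          (minL ((PySem.List.pyRange (i + 1) (i + L) 1).map (fun k =>
            (PySem.List.pyGetD ([(0 : Int)] ++ cs ++ [n]) (i + L) 0 - PySem.List.pyGetD ([(0 : Int)] ++ cs ++ [n]) i 0)
            + PySem.List.pyGetD (PySem.List.pyGetD T i []) k 0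
            + PySem.List.pyGetD (PySem.List.pyGetD T k []) (i + L) 0)))))
      (fun x T => Shape T ([(0 : Int)] ++ cs ++ [n]).length ∧ ∀ a b : Nat, a < ([(0 : Int)] ++ cs ++ [n]).length → b < ([(0 : Int)] ++ cs ++ [n]).length →
        EntN T a b = if ((b : Int) - (a : Int) < L ∨ ((b : Int) - (a : Int) = L ∧ (a : Int) < x))
          then OPT ([(0 : Int)] ++ cs ++ [n]) (a : Int) (b : Int) else 0)
      ((((([(0 : Int)] ++ cs ++ [n]).length : Int)) - L).toNat) 0 (((([(0 : Int)] ++ cs ++ [n]).length : Int)) - L) (by omega) (by omega)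
      (innerstep L hL2 hLm) T base0
    exact ⟨inner.1, fun a b ha hb => (inner.2 a b ha hb).trans (if_congr (by omega) rfl rfl)⟩
  case _ =>
    have hsol : solution (n, cs)
        = PySem.List.pyGetD (PySem.List.pyGetD ((PySem.List.pyRange 2 ((([(0 : Int)] ++ cs ++ [n]).length : Int)) 1).foldl
      (fun T length =>
      (PySem.List.pyRange 0 (((([(0 : Int)] ++ cs ++ [n]).length : Int)) - length) 1).foldl
        (fun T i =>
        PySem.List.pySetD T i (PySem.List.pySetD (PySem.List.pyGetD T i []) (i + length)
          (minL ((PySem.List.pyRange (i + 1) (i + length) 1).map (fun k =>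
            (PySem.List.pyGetD ([(0 : Int)] ++ cs ++ [n]) (i + length) 0 - PySem.List.pyGetD ([(0 : Int)] ++ cs ++ [n]) i 0)
            + PySem.List.pyGetD (PySem.List.pyGetD T i []) k 0
            + PySem.List.pyGetD (PySem.List.pyGetD T k []) (i + length) 0))))) T) ((PySem.List.pyRange 0 ((([(0 : Int)] ++ cs ++ [n]).length : Int)) 1).map (fun _ => List.replicate ([(0 : Int)] ++ cs ++ [n]).length (0 : Int)))) 0 []) (((([(0 : Int)] ++ cs ++ [n]).length : Int)) - 1) 0 := rfl
    rw [hsol]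
    obtain ⟨b1, hb1⟩ : ∃ b1 : Nat, ((([(0 : Int)] ++ cs ++ [n]).length : Int)) - 1 = (b1 : Int) := ⟨(((([(0 : Int)] ++ cs ++ [n]).length : Int)) - 1).toNat, by omega⟩
    rw [hb1]
    rw [show PySem.List.pyGetD (PySem.List.pyGetD ((PySem.List.pyRange 2 ((([(0 : Int)] ++ cs ++ [n]).length : Int)) 1).foldl
      (fun T length =>
      (PySem.List.pyRange 0 (((([(0 : Int)] ++ cs ++ [n]).length : Int)) - length) 1).foldl
        (fun T i =>
        PySem.List.pySetD T i (PySem.List.pySetD (PySem.List.pyGetD T i []) (i + length)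
          (minL ((PySem.List.pyRange (i + 1) (i + length) 1).map (fun k =>
            (PySem.List.pyGetD ([(0 : Int)] ++ cs ++ [n]) (i + length) 0 - PySem.List.pyGetD ([(0 : Int)] ++ cs ++ [n]) i 0)
            + PySem.List.pyGetD (PySem.List.pyGetD T i []) k 0
            + PySem.List.pyGetD (PySem.List.pyGetD T k []) (i + length) 0))))) T) ((PySem.List.pyRange 0 ((([(0 : Int)] ++ cs ++ [n]).length : Int)) 1).map (fun _ => List.replicate ([(0 : Int)] ++ cs ++ [n]).length (0 : Int)))) (0 : Int) []) ((b1 : Nat) : Int) 0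
        = EntN ((PySem.List.pyRange 2 ((([(0 : Int)] ++ cs ++ [n]).length : Int)) 1).foldl
      (fun T length =>
      (PySem.List.pyRange 0 (((([(0 : Int)] ++ cs ++ [n]).length : Int)) - length) 1).foldl
        (fun T i =>
        PySem.List.pySetD T i (PySem.List.pySetD (PySem.List.pyGetD T i []) (i + length)
          (minL ((PySem.List.pyRange (i + 1) (i + length) 1).map (fun k =>
            (PySem.List.pyGetD ([(0 : Int)] ++ cs ++ [n]) (i + length) 0 - PySem.List.pyGetD ([(0 : Int)] ++ cs ++ [n]) i 0)
            + PySem.List.pyGetD (PySem.List.pyGetD T i []) k 0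
            + PySem.List.pyGetD (PySem.List.pyGetD T k []) (i + length) 0))))) T) ((PySem.List.pyRange 0 ((([(0 : Int)] ++ cs ++ [n]).length : Int)) 1).map (fun _ => List.replicate ([(0 : Int)] ++ cs ++ [n]).length (0 : Int)))) 0 b1 from ent_cast _ 0 b1]
    rw [outer.2 0 b1 (by omega) (by omega), if_pos (by omega)]
    rfl

-- ===== VERDICT (by name: the statement is the Claim_ definition above) =====
theorem solution_spec : Claim_equal_solution := by
  intro args _
  unfold Spec_solution
  obtain ⟨n, cs⟩ := args
  rw [solution_eq, alt_eq]
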